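-- pv_equiv track=rewrite | github.com/QI-SYAN/agent-demo1 | src/video_tampering_agent/tools/car_detection.py | _extract_zero_segments
-- ===== SOURCE A (Python) =====
-- from typing import Any, List, Optional, Tuple, Dict, Set
--
-- def _extract_zero_segments(series: List[int]) -> List[Tuple[int, int]]:
--     segments: List[Tuple[int, int]] = []
--     start: Optional[int] = None
--     for idx, value in enumerate(series):
--         if value == 0:
--             if start is None:
--                 start = idx
--         elif start is not None:
--             segments.append((start, idx - 1))
--             start = None
--     if start is not None:
--         segments.append((start, len(series) - 1))
--     return segments
-- ===== SOURCE B (Python) =====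
-- from itertools import groupby
-- from typing import List, Tuple
--
-- def _extract_zero_segments(series: List[int]) -> List[Tuple[int, int]]:
--     segments: List[Tuple[int, int]] = []
--     idx = 0
--     for is_zero, grp in groupby(series, key=lambda v: v == 0):
--         n = sum(1 for _ in grp)
--         if is_zero:
--             segments.append((idx, idx + n - 1))
--         idx += n
--     return segments
-- ===== Notes on version B (the rewrite author's own statement) =====
-- stated objective: idiomatic
-- what changed: Replaced the open/close sentinel state machine (Optional start with a trailing flush) by itertools.groupby over runs keyed on v == 0, emitting one segment per zero-run while tracking a running start index.
import Mathlib
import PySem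

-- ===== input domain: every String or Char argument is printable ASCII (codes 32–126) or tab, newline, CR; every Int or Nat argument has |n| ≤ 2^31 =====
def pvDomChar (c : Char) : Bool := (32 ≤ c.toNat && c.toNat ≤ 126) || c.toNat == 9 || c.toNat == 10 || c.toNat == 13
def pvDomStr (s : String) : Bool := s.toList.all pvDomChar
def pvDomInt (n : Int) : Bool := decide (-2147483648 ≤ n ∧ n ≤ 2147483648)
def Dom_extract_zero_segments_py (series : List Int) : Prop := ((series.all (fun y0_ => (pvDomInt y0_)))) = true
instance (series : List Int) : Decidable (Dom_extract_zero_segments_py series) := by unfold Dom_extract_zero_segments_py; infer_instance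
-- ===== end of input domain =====

-- B replaces A's open/close sentinel state machine by a partition into maximal runs
-- (itertools.groupby keyed on v == 0), emitting one segment per zero-run (objective: idiomatic).

-- ===== PORT A =====
-- The for-loop over enumerate(series): state is (segments, start), idx counts up.
def pvALoop : List Int → Int → List (Int × Int) → Option Int → (List (Int × Int) × Option Int)
  | [], _, segs, start => (segs, start)
  | v :: rest, idx, segs, start =>
    if v = 0 then
      match start with
      | none => pvALoop rest (idx + 1) segs (some idx)
      | some _ => pvALoop rest (idx + 1) segs start
    else
      match start with
      | some s => pvALoop rest (idx + 1) (segs ++ [(s, idx - 1)]) none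
      | none => pvALoop rest (idx + 1) segs start

def extract_zero_segments_py (series : List Int) : List (Int × Int) :=
  let st := pvALoop series 0 [] none
  match st.2 with
  | some s => st.1 ++ [(s, (series.length : Int) - 1)]
  | none => st.1

-- ===== PORT B =====
-- groupby(series, key=λv. v == 0): each step consumes one maximal run (its head x plus the
-- following elements with the same key), counts its length n, and advances the running index.
def pvBGo (i : Int) : List Int → List (Int × Int)
  | [] => []
  | x :: xs =>
    let k : Bool := x == 0
    let t := xs.takeWhile (fun v => (v == 0) == k)
    let rest := xs.dropWhile (fun v => (v == 0) == k)
    let n : Int := (t.length : Int) + 1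
    if k then (i, i + n - 1) :: pvBGo (i + n) rest else pvBGo (i + n) rest
  termination_by l => l.length
  decreasing_by
    all_goals exact Nat.lt_succ_of_le (List.length_dropWhile_le _ _)

def extract_zero_segments_py_alt (series : List Int) : List (Int × Int) :=
  pvBGo 0 series

-- ===== PRECONDITION & SPEC =====
def Spec_extract_zero_segments_py (series : List Int) (out : List (Int × Int)) : Prop := out = extract_zero_segments_py_alt series
instance (series : List Int) (out : List (Int × Int)) : Decidable (Spec_extract_zero_segments_py series out) := by unfold Spec_extract_zero_segments_py; infer_instance

-- ===== CLAIM (what is proved, stated in full; the proofs are below) =====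
def Claim_equal_extract_zero_segments_py : Prop := ∀ (series : List Int), Dom_extract_zero_segments_py series → Spec_extract_zero_segments_py series (extract_zero_segments_py series)

-- ===== LEMMAS AND PROOFS =====

-- A's loop followed by the final flush, the flush endpoint written from the running index.
def pvFlush (p : List (Int × Int) × Option Int) (e : Int) : List (Int × Int) :=
  match p.2 with
  | some s => p.1 ++ [(s, e)]
  | none => p.1

def pvAFin (l : List Int) (i : Int) (segs : List (Int × Int)) (start : Option Int) : List (Int × Int) :=
  pvFlush (pvALoop l i segs start) (i + l.length - 1)

lemma pvBGo_skip (i : Int) (x : Int) (xs : List Int) (hx : x ≠ 0) :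
    pvBGo i (x :: xs) = pvBGo (i + 1) xs := by
  have hx' : (x == 0) = false := by simp [hx]
  cases xs with
  | nil => rw [pvBGo]; simp [hx', pvBGo]
  | cons y ys =>
    by_cases hy : y = 0
    · have hy' : (y == 0) = true := by simp [hy]
      rw [pvBGo]
      simp [hx', hy']
    · have hy' : (y == 0) = false := by simp [hy]
      rw [pvBGo, pvBGo]
      simp only [hx', hy', List.takeWhile_cons, List.dropWhile_cons, beq_self_eq_true,
        Bool.false_eq_true, if_false]
      congr 1
      push_cast [List.length_cons]
      ring

lemma pvBGo_zero (i : Int) (xs : List Int) :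
    pvBGo i ((0 : Int) :: xs) =
      (i, i + 1 + ((xs.takeWhile (fun v => v == 0)).length : Int) - 1) ::
        pvBGo (i + 1 + ((xs.takeWhile (fun v => v == 0)).length : Int))
          (xs.dropWhile (fun v => v == 0)) := by
  rw [pvBGo]
  simp only [beq_self_eq_true, beq_true, if_true]
  have h : i + (((xs.takeWhile (fun v => v == 0)).length : Int) + 1) =
      i + 1 + ((xs.takeWhile (fun v => v == 0)).length : Int) := by ring
  rw [h]

lemma pvMain (l : List Int) : ∀ (i : Int) (segs : List (Int × Int)),
    (pvAFin l i segs none = segs ++ pvBGo i l) ∧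
    ∀ s : Int, pvAFin l i segs (some s) =
      segs ++ (s, i + ((l.takeWhile (fun v => v == 0)).length : Int) - 1) ::
        pvBGo (i + ((l.takeWhile (fun v => v == 0)).length : Int)) (l.dropWhile (fun v => v == 0)) := by
  induction l with
  | nil =>
    intro i segs
    refine ⟨by simp [pvAFin, pvALoop, pvFlush, pvBGo], fun s => ?_⟩
    simp [pvAFin, pvALoop, pvFlush, pvBGo]
  | cons x xs ih =>
    intro i segs
    by_cases hx : x = 0
    · subst hx
      have hstep : ∀ st : Option Int, pvAFin ((0 : Int) :: xs) i segs st =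
          pvAFin xs (i + 1) segs (match st with | none => some i | some s => some s) := by
        intro st
        cases st <;>
        · simp only [pvAFin, pvALoop, List.length_cons]
          congr 1
          push_cast; ring
      constructor
      · rw [hstep none, (ih (i + 1) segs).2 i, pvBGo_zero]
      · intro s
        rw [hstep (some s), (ih (i + 1) segs).2 s]
        simp only [List.takeWhile_cons, List.dropWhile_cons, beq_self_eq_true, if_true,
          List.length_cons]
        have h1 : i + (((xs.takeWhile (fun v => v == 0)).length : Int) + 1) =
            i + 1 + ((xs.takeWhile (fun v => v == 0)).length : Int) := by ring
        push_cast
        rw [h1]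
    · have hx' : (x == 0) = false := by simp [hx]
      constructor
      · have hstep : pvAFin (x :: xs) i segs none = pvAFin xs (i + 1) segs none := by
          simp only [pvAFin, pvALoop, if_neg hx, List.length_cons]
          congr 1
          push_cast; ring
        rw [hstep, (ih (i + 1) segs).1, pvBGo_skip i x xs hx]
      · intro s
        have hstep : pvAFin (x :: xs) i segs (some s) =
            pvAFin xs (i + 1) (segs ++ [(s, i - 1)]) none := by
          simp only [pvAFin, pvALoop, if_neg hx, List.length_cons]
          congr 1
          push_cast; ring
        rw [hstep, (ih (i + 1) (segs ++ [(s, i - 1)])).1]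
        simp only [List.takeWhile_cons, List.dropWhile_cons, hx', Bool.false_eq_true,
          if_false, List.length_nil, Nat.cast_zero, add_zero]
        rw [pvBGo_skip i x xs hx]
        simp

-- ===== VERDICT (by name: the statement is the Claim_ definition above) =====
theorem extract_zero_segments_py_spec : Claim_equal_extract_zero_segments_py := by
  intro series _
  unfold Spec_extract_zero_segments_py extract_zero_segments_py extract_zero_segments_py_alt
  have h := (pvMain series 0 []).1
  simpa [pvAFin, pvFlush] using h
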